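-- pv_equiv track=rewrite | github.com/KumarAmbuj/gfg_string_arithematic_operation | 7.max no in string.py | maxNoinString
-- ===== SOURCE A (Python) =====
-- def maxNoinString(s):
--     l=[]
--     res=''
--
--     for x in s:
--         if x.isdigit():
--             res=res+x
--         elif x.isalpha():
--             if len(res)>0:
--                 l.append(int(res))
--                 res=''
--     if len(res)>0:
--         l.append(int(res))
--
--     return max(l)
-- ===== SOURCE B (Python) =====
-- def maxNoinString(s):
--     # preprocess: digits stay, letters become a separator, everything else is dropped
--     # (non-alpha non-digit chars fuse adjacent digit runs, as in the original)
--     t = ''.join(c if c.isdigit() else ' ' if c.isalpha() else '' for c in s)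
--     return max(int(p) for p in t.split())
-- ===== Notes on version B (the rewrite author's own statement) =====
-- stated objective: alternative
-- what changed: Replaces the single-pass accumulator state machine with a preprocess-then-split-then-reduce pipeline: map each char to digit/separator/dropped, split on whitespace, take max of the int tokens.
import Mathlib
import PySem

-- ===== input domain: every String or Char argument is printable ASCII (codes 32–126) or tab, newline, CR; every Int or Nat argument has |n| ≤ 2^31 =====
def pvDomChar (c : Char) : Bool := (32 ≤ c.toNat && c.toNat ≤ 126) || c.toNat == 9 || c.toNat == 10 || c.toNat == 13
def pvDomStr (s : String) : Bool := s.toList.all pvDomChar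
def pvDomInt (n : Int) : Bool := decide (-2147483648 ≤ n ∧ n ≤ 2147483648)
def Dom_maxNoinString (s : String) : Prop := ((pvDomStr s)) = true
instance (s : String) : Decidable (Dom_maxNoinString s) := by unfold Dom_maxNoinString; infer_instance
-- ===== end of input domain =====

-- B replaces A's single-pass accumulator state machine by a map/split/reduce pipeline; same O(n) cost (objective: alternative).

-- int(res) where res is a (nonempty, under Pre_) string of digits; PySem.Int.ofChars? is exact there
def pvIntOf (res : List Char) : Int := (PySem.Int.ofChars? res).getD 0

-- ===== PORT A =====
-- the for-loop over s with state (l, res)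
def maxNoinStringStep (st : List Int × List Char) (x : Char) : List Int × List Char :=
  if PySem.Chars.isdigit x then (st.1, st.2 ++ [x])
  else if PySem.Chars.isalpha x then
    (if st.2.length > 0 then (st.1 ++ [pvIntOf st.2], ([] : List Char)) else st)
  else st

def maxNoinString (s : String) : Int :=
  let st := s.toList.foldl maxNoinStringStep ([], [])
  let l := if st.2.length > 0 then st.1 ++ [pvIntOf st.2] else st.1
  (PySem.List.max? l (fun x => x)).getD 0   -- max(l); Python raises ValueError on l = [], excluded by Pre_

-- ===== PORT B =====
-- ''.join(c if c.isdigit() else ' ' if c.isalpha() else '' for c in s)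
def maxNoinStringTf (c : Char) : List Char :=
  if PySem.Chars.isdigit c then [c] else if PySem.Chars.isalpha c then [' '] else []

def maxNoinString_alt (s : String) : Int :=
  let t : List Char := s.toList.flatMap maxNoinStringTf
  let vals := (PySem.Chars.split₀ t).map pvIntOf   -- int(p) for p in t.split()
  (PySem.List.max? vals (fun x => x)).getD 0   -- max(...); ValueError on empty excluded by Pre_

-- ===== PRECONDITION & SPEC =====
-- Python A (and B) raise ValueError (max of empty sequence) when s contains no digit; excluded.
def Pre_maxNoinString (s : String) : Prop := s.toList.any PySem.Chars.isdigit = true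
instance (s : String) : Decidable (Pre_maxNoinString s) := by unfold Pre_maxNoinString; infer_instance
def pvWitness_maxNoinString : String := "abc12-3x"

def Spec_maxNoinString (s : String) (out : Int) : Prop := out = maxNoinString_alt s
instance (s : String) (out : Int) : Decidable (Spec_maxNoinString s out) := by unfold Spec_maxNoinString; infer_instance

-- ===== CLAIM (what is proved, stated in full; the proofs are below) =====
def Claim_equal_maxNoinString : Prop := ∀ (s : String), Dom_maxNoinString s → Pre_maxNoinString s → Spec_maxNoinString s (maxNoinString s)

-- ===== LEMMAS AND PROOFS =====

theorem isspace_of_isdigit (c : Char) (h : PySem.Chars.isdigit c = true) :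
    PySem.Chars.isspace c = false := by
  simp [PySem.Chars.isdigit] at h
  have h1 : 48 ≤ c.toNat := h.1
  have h2 : c.toNat ≤ 57 := h.2
  simp [PySem.Chars.isspace]
  omega

theorem go_acc (t cur acc) :
    PySem.Chars.split₀.go t cur acc = acc.reverse ++ PySem.Chars.split₀.go t cur [] := by
  induction t generalizing cur acc with
  | nil => simp [PySem.Chars.split₀.go]; split_ifs <;> simp
  | cons c rest ih =>
    simp only [PySem.Chars.split₀.go]
    split_ifs with h1 h2
    · exact ih _ _
    · rw [ih [] (cur.reverse :: acc), ih [] [cur.reverse]]; simp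
    · exact ih _ _

theorem go_space (t : List Char) (cur : List Char) (acc : List (List Char)) :
    PySem.Chars.split₀.go (' ' :: t) cur acc =
      if cur.isEmpty then PySem.Chars.split₀.go t [] acc
      else PySem.Chars.split₀.go t [] (cur.reverse :: acc) := by
  simp [PySem.Chars.split₀.go, show PySem.Chars.isspace ' ' = true from by decide]

theorem loop_eq (cs : List Char) : ∀ (l : List Int) (res : List Char),
    (if (cs.foldl maxNoinStringStep (l, res)).2.length > 0
     then (cs.foldl maxNoinStringStep (l, res)).1 ++ [pvIntOf (cs.foldl maxNoinStringStep (l, res)).2]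
     else (cs.foldl maxNoinStringStep (l, res)).1)
    = l ++ (PySem.Chars.split₀.go (cs.flatMap maxNoinStringTf) res.reverse []).map pvIntOf := by
  induction cs with
  | nil =>
    intro l res
    simp only [List.foldl_nil, List.flatMap_nil, PySem.Chars.split₀.go]
    by_cases h : res = []
    · simp [h]
    · have : res.length > 0 := List.length_pos_iff.mpr h
      simp [this, List.isEmpty_iff, h]
  | cons c rest ih =>
    intro l res
    simp only [List.foldl_cons, List.flatMap_cons]
    by_cases h1 : PySem.Chars.isdigit c
    · -- digit: res grows, the transformed stream gets a non-space char
      rw [show maxNoinStringStep (l, res) c = (l, res ++ [c]) by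
        simp [maxNoinStringStep, h1]]
      rw [ih]
      simp [maxNoinStringTf, h1, PySem.Chars.split₀.go, isspace_of_isdigit c h1]
    · by_cases h2 : PySem.Chars.isalpha c
      · by_cases h3 : res.length > 0
        · -- alpha, res nonempty: A flushes; B's stream gets a separator closing a token
          rw [show maxNoinStringStep (l, res) c = (l ++ [pvIntOf res], ([] : List Char)) by
            simp [maxNoinStringStep, h1, h2, h3]]
          rw [ih]
          have hres : ¬ res.reverse.isEmpty = true := by
            simp only [List.isEmpty_iff, List.reverse_eq_nil_iff]
            exact fun h => by simp [h] at h3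
          rw [show maxNoinStringTf c = [' '] by simp [maxNoinStringTf, h1, h2],
            List.singleton_append, go_space, if_neg hres,
            go_acc _ [] [res.reverse.reverse]]
          simp
        · -- alpha, res empty: both sides a no-op token-wise
          have hres : res = [] := by cases res <;> simp_all
          rw [show maxNoinStringStep (l, res) c = (l, res) by
            simp [maxNoinStringStep, h1, h2, h3]]
          rw [ih]
          subst hres
          rw [show maxNoinStringTf c = [' '] by simp [maxNoinStringTf, h1, h2],
            List.singleton_append, go_space]
          simp
      · -- other char: A ignores it, B drops it
        rw [show maxNoinStringStep (l, res) c = (l, res) by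
          simp [maxNoinStringStep, h1, h2]]
        rw [ih]
        simp [maxNoinStringTf, h1, h2]

theorem ports_eq (s : String) : maxNoinString s = maxNoinString_alt s := by
  simp only [maxNoinString, maxNoinString_alt]
  rw [loop_eq s.toList [] []]
  simp [PySem.Chars.split₀]

-- ===== VERDICT (by name: the statement is the Claim_ definition above) =====
theorem maxNoinString_spec : Claim_equal_maxNoinString := by
  intro s _ _
  exact ports_eq s
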